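-- pv_equiv track=rewrite | github.com/sem1hX1/QuadCoreWebApp | backend/app/ai/description.py | _smart_fallback_description
-- ===== SOURCE A (Python) =====
-- def _smart_fallback_description(product) -> str:
--     """Gemini erişilemediğinde ürün tipine göre daha bilgilendirici bir özet üretir."""
--     title = (product.get("title") or "").strip()
--     brand = (product.get("brand") or "").strip()
--     t = title.lower()
--
--     if any(k in t for k in ["esp32", "esp-32"]):
--         hint = "Wi-Fi/Bluetooth destekli düşük güç tüketimli mikrodenetleyici; IoT ve sensör ağları için uygundur."
--     elif any(k in t for k in ["esp8266", "nodemcu"]):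
--         hint = "Wi-Fi destekli düşük maliyetli mikrodenetleyici; basit IoT projeleri için tercih edilir."
--     elif "stm32" in t:
--         hint = "ARM Cortex-M tabanlı yüksek performanslı 32-bit MCU; gömülü kontrol uygulamalarında yaygın kullanılır."
--     elif "arduino" in t:
--         hint = "Geliştirme ve prototipleme için popüler MCU kartı; geniş kütüphane ekosistemine sahiptir."
--     elif "raspberry" in t or "rpi" in t:
--         hint = "Linux çalıştırabilen tek kart bilgisayar; ağ uygulamaları ve görüntü işleme için uygundur."
--     elif "atmega" in t or "attiny" in t:
--         hint = "Düşük güçlü 8-bit AVR mikrodenetleyici; basit kontrol ve ölçüm devrelerinde kullanılır."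
--     elif "lcd" in t or "oled" in t or "display" in t or "ekran" in t:
--         hint = "Gömülü sistemlerde kullanıcı arayüzü için tercih edilen ekran modülü."
--     elif "sensor" in t or "sensör" in t:
--         hint = "Çevresel ölçüm ve veri toplama uygulamaları için sensör modülü."
--     elif "motor" in t or "servo" in t or "step" in t:
--         hint = "Robotik ve hareket kontrol uygulamaları için motor/sürücü bileşeni."
--     elif "regülat" in t or "regulator" in t or "lm" in t and any(c.isdigit() for c in t):
--         hint = "Güç yönetimi ve gerilim regülasyonu için kullanılan analog bileşen."
--     else:
--         hint = "Elektronik prototipleme ve gömülü sistem projelerinde kullanılan bileşen."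
--
--     prefix = f"{brand} {title}".strip() if brand else title
--     return f"{prefix}: {hint}"[:150]
-- ===== SOURCE B (Python) =====
-- _HINTS = [
--     "Wi-Fi/Bluetooth destekli düşük güç tüketimli mikrodenetleyici; IoT ve sensör ağları için uygundur.",
--     "Wi-Fi destekli düşük maliyetli mikrodenetleyici; basit IoT projeleri için tercih edilir.",
--     "ARM Cortex-M tabanlı yüksek performanslı 32-bit MCU; gömülü kontrol uygulamalarında yaygın kullanılır.",
--     "Geliştirme ve prototipleme için popüler MCU kartı; geniş kütüphane ekosistemine sahiptir.",
--     "Linux çalıştırabilen tek kart bilgisayar; ağ uygulamaları ve görüntü işleme için uygundur.",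
--     "Düşük güçlü 8-bit AVR mikrodenetleyici; basit kontrol ve ölçüm devrelerinde kullanılır.",
--     "Gömülü sistemlerde kullanıcı arayüzü için tercih edilen ekran modülü.",
--     "Çevresel ölçüm ve veri toplama uygulamaları için sensör modülü.",
--     "Robotik ve hareket kontrol uygulamaları için motor/sürücü bileşeni.",
--     "Güç yönetimi ve gerilim regülasyonu için kullanılan analog bileşen.",
--     "Elektronik prototipleme ve gömülü sistem projelerinde kullanılan bileşen.",
-- ]
--
-- # flat (keyword, category-index) table; categories are numbered in A's priority order,
-- # so "first matching branch" == "smallest matching category index".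
-- _KEYWORDS = [
--     ("esp32", 0), ("esp-32", 0),
--     ("esp8266", 1), ("nodemcu", 1),
--     ("stm32", 2),
--     ("arduino", 3),
--     ("raspberry", 4), ("rpi", 4),
--     ("atmega", 5), ("attiny", 5),
--     ("lcd", 6), ("oled", 6), ("display", 6), ("ekran", 6),
--     ("sensor", 7), ("sensör", 7),
--     ("motor", 8), ("servo", 8), ("step", 8),
--     ("regülat", 9), ("regulator", 9),
-- ]
--
--
-- def _best_index(t):
--     best = len(_HINTS) - 1  # index of the default hint
--     for kw, idx in _KEYWORDS:
--         if kw in t: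
--             best = min(best, idx)
--     if "lm" in t and any(c.isdigit() for c in t):
--         best = min(best, 9)
--     return best
--
--
-- def _smart_fallback_description(product) -> str:
--     title = (product.get("title") or "").strip()
--     brand = (product.get("brand") or "").strip()
--     t = title.lower()
--     hint = _HINTS[_best_index(t)]
--     prefix = f"{brand} {title}".strip() if brand else title
--     return f"{prefix}: {hint}"[:150]
-- ===== Notes on version B (the rewrite author's own statement) =====
-- stated objective: alternative
-- what changed: Replaces A's first-match if/elif ladder with a min-aggregation over a flat (keyword, category-index) table: all keyword matches are folded into the smallest matching category index (categories numbered in A's priority order) which then selects the hint from a list, with the lm+digit rule as one extra adjustment.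
import Mathlib
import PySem

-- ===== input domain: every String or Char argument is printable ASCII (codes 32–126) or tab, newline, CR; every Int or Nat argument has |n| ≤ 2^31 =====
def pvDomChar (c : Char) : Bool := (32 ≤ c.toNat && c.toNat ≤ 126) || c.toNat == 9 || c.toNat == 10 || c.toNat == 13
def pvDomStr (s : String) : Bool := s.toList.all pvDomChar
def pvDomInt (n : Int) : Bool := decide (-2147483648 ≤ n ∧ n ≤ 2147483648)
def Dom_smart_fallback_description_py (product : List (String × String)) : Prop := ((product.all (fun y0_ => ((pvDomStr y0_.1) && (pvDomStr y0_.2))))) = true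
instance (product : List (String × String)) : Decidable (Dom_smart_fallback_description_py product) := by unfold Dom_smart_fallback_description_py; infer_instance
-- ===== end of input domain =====

-- B replaces A's first-match if/elif ladder by a min-aggregation over a flat (keyword, category) table: categories are numbered in priority order, so the first matching branch is the smallest matching index; alternative, same cost.

-- ===== PORT A =====
-- A's if/elif chain computing the hint from the lowercased title (kept as a helper; the branch order and conditions are A's).
def pvHintChainA (t : String) : String :=
  if (["esp32", "esp-32"] : List String).any (fun k => PySem.Str.isIn k t) then
    "Wi-Fi/Bluetooth destekli düşük güç tüketimli mikrodenetleyici; IoT ve sensör ağları için uygundur."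
  else if (["esp8266", "nodemcu"] : List String).any (fun k => PySem.Str.isIn k t) then
    "Wi-Fi destekli düşük maliyetli mikrodenetleyici; basit IoT projeleri için tercih edilir."
  else if PySem.Str.isIn "stm32" t then
    "ARM Cortex-M tabanlı yüksek performanslı 32-bit MCU; gömülü kontrol uygulamalarında yaygın kullanılır."
  else if PySem.Str.isIn "arduino" t then
    "Geliştirme ve prototipleme için popüler MCU kartı; geniş kütüphane ekosistemine sahiptir."
  else if PySem.Str.isIn "raspberry" t || PySem.Str.isIn "rpi" t then
    "Linux çalıştırabilen tek kart bilgisayar; ağ uygulamaları ve görüntü işleme için uygundur."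
  else if PySem.Str.isIn "atmega" t || PySem.Str.isIn "attiny" t then
    "Düşük güçlü 8-bit AVR mikrodenetleyici; basit kontrol ve ölçüm devrelerinde kullanılır."
  else if PySem.Str.isIn "lcd" t || PySem.Str.isIn "oled" t || PySem.Str.isIn "display" t || PySem.Str.isIn "ekran" t then
    "Gömülü sistemlerde kullanıcı arayüzü için tercih edilen ekran modülü."
  else if PySem.Str.isIn "sensor" t || PySem.Str.isIn "sensör" t then
    "Çevresel ölçüm ve veri toplama uygulamaları için sensör modülü."
  else if PySem.Str.isIn "motor" t || PySem.Str.isIn "servo" t || PySem.Str.isIn "step" t then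
    "Robotik ve hareket kontrol uygulamaları için motor/sürücü bileşeni."
  else if PySem.Str.isIn "regülat" t || PySem.Str.isIn "regulator" t || (PySem.Str.isIn "lm" t && t.toList.any PySem.Chars.isdigit) then
    "Güç yönetimi ve gerilim regülasyonu için kullanılan analog bileşen."
  else
    "Elektronik prototipleme ve gömülü sistem projelerinde kullanılan bileşen."

def smart_fallback_description_py (product : List (String × String)) : String :=
  let title := PySem.Str.strip (((PySem.Dict.mk product).get? "title").getD "")
  let brand := PySem.Str.strip (((PySem.Dict.mk product).get? "brand").getD "")
  let t := PySem.Str.lower title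
  let hint := pvHintChainA t
  let prefix_ := if brand ≠ "" then PySem.Str.strip (String.ofList (brand.toList ++ ' ' :: title.toList)) else title
  PySem.Str.slice (String.ofList (prefix_.toList ++ ':' :: ' ' :: hint.toList)) none (some 150)

-- ===== PORT B =====
-- B's hint list: the ten category hints in priority order, then the default at index 10.
def pvHints : List String :=
  [ "Wi-Fi/Bluetooth destekli düşük güç tüketimli mikrodenetleyici; IoT ve sensör ağları için uygundur.",
    "Wi-Fi destekli düşük maliyetli mikrodenetleyici; basit IoT projeleri için tercih edilir.",
    "ARM Cortex-M tabanlı yüksek performanslı 32-bit MCU; gömülü kontrol uygulamalarında yaygın kullanılır.",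
    "Geliştirme ve prototipleme için popüler MCU kartı; geniş kütüphane ekosistemine sahiptir.",
    "Linux çalıştırabilen tek kart bilgisayar; ağ uygulamaları ve görüntü işleme için uygundur.",
    "Düşük güçlü 8-bit AVR mikrodenetleyici; basit kontrol ve ölçüm devrelerinde kullanılır.",
    "Gömülü sistemlerde kullanıcı arayüzü için tercih edilen ekran modülü.",
    "Çevresel ölçüm ve veri toplama uygulamaları için sensör modülü.",
    "Robotik ve hareket kontrol uygulamaları için motor/sürücü bileşeni.",
    "Güç yönetimi ve gerilim regülasyonu için kullanılan analog bileşen.",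
    "Elektronik prototipleme ve gömülü sistem projelerinde kullanılan bileşen." ]

-- B's flat (keyword, category-index) table.
def pvKeywords : List (String × Nat) :=
  [ ("esp32", 0), ("esp-32", 0),
    ("esp8266", 1), ("nodemcu", 1),
    ("stm32", 2),
    ("arduino", 3),
    ("raspberry", 4), ("rpi", 4),
    ("atmega", 5), ("attiny", 5),
    ("lcd", 6), ("oled", 6), ("display", 6), ("ekran", 6),
    ("sensor", 7), ("sensör", 7),
    ("motor", 8), ("servo", 8), ("step", 8),
    ("regülat", 9), ("regulator", 9) ]

-- _best_index(t): smallest category index among the matching keywords (plus the lm+digit rule), default 10.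
def pvBestIndex (t : String) : Nat :=
  let best := pvKeywords.foldl (fun best kv => if PySem.Str.isIn kv.1 t then min best kv.2 else best) (pvHints.length - 1)
  if PySem.Str.isIn "lm" t && t.toList.any PySem.Chars.isdigit then min best 9 else best

def smart_fallback_description_py_alt (product : List (String × String)) : String :=
  let title := PySem.Str.strip (((PySem.Dict.mk product).get? "title").getD "")
  let brand := PySem.Str.strip (((PySem.Dict.mk product).get? "brand").getD "")
  let t := PySem.Str.lower title
  let hint := pvHints.getD (pvBestIndex t) ""
  let prefix_ := if brand ≠ "" then PySem.Str.strip (String.ofList (brand.toList ++ ' ' :: title.toList)) else title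
  PySem.Str.slice (String.ofList (prefix_.toList ++ ':' :: ' ' :: hint.toList)) none (some 150)

-- ===== PRECONDITION & SPEC =====
def Spec_smart_fallback_description_py (product : List (String × String)) (out : String) : Prop := out = smart_fallback_description_py_alt product
instance (product : List (String × String)) (out : String) : Decidable (Spec_smart_fallback_description_py product out) := by unfold Spec_smart_fallback_description_py; infer_instance

-- ===== CLAIM (what is proved, stated in full; the proofs are below) =====
def Claim_equal_smart_fallback_description_py : Prop := ∀ (product : List (String × String)), Dom_smart_fallback_description_py product → Spec_smart_fallback_description_py product (smart_fallback_description_py product)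

-- ===== LEMMAS AND PROOFS =====
-- A's first matching branch is B's smallest matching category index: case on the keywords in priority order.
theorem pvHint_eq (t : String) :
    pvHintChainA t = pvHints.getD (pvBestIndex t) "" := by
  unfold pvHintChainA pvBestIndex pvKeywords pvHints
  by_cases h1 : PySem.Chars.isIn ['e', 's', 'p', '3', '2'] t.toList = true
  · simp [h1]
  by_cases h2 : PySem.Chars.isIn ['e', 's', 'p', '-', '3', '2'] t.toList = true
  · simp [h1, h2]
  by_cases h3 : PySem.Chars.isIn ['e', 's', 'p', '8', '2', '6', '6'] t.toList = true
  · simp [h1, h2, h3]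
  by_cases h4 : PySem.Chars.isIn ['n', 'o', 'd', 'e', 'm', 'c', 'u'] t.toList = true
  · simp [h1, h2, h3, h4]
  by_cases h5 : PySem.Chars.isIn ['s', 't', 'm', '3', '2'] t.toList = true
  · simp [h1, h2, h3, h4, h5]
  by_cases h6 : PySem.Chars.isIn ['a', 'r', 'd', 'u', 'i', 'n', 'o'] t.toList = true
  · simp [h1, h2, h3, h4, h5, h6]
  by_cases h7 : PySem.Chars.isIn ['r', 'a', 's', 'p', 'b', 'e', 'r', 'r', 'y'] t.toList = true
  · simp [h1, h2, h3, h4, h5, h6, h7]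
  by_cases h8 : PySem.Chars.isIn ['r', 'p', 'i'] t.toList = true
  · simp [h1, h2, h3, h4, h5, h6, h7, h8]
  by_cases h9 : PySem.Chars.isIn ['a', 't', 'm', 'e', 'g', 'a'] t.toList = true
  · simp [h1, h2, h3, h4, h5, h6, h7, h8, h9]
  by_cases h10 : PySem.Chars.isIn ['a', 't', 't', 'i', 'n', 'y'] t.toList = true
  · simp [h1, h2, h3, h4, h5, h6, h7, h8, h9, h10]
  by_cases h11 : PySem.Chars.isIn ['l', 'c', 'd'] t.toList = true
  · simp [h1, h2, h3, h4, h5, h6, h7, h8, h9, h10, h11]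
  by_cases h12 : PySem.Chars.isIn ['o', 'l', 'e', 'd'] t.toList = true
  · simp [h1, h2, h3, h4, h5, h6, h7, h8, h9, h10, h11, h12]
  by_cases h13 : PySem.Chars.isIn ['d', 'i', 's', 'p', 'l', 'a', 'y'] t.toList = true
  · simp [h1, h2, h3, h4, h5, h6, h7, h8, h9, h10, h11, h12, h13]
  by_cases h14 : PySem.Chars.isIn ['e', 'k', 'r', 'a', 'n'] t.toList = true
  · simp [h1, h2, h3, h4, h5, h6, h7, h8, h9, h10, h11, h12, h13, h14]
  by_cases h15 : PySem.Chars.isIn ['s', 'e', 'n', 's', 'o', 'r'] t.toList = true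
  · simp [h1, h2, h3, h4, h5, h6, h7, h8, h9, h10, h11, h12, h13, h14, h15]
  by_cases h16 : PySem.Chars.isIn ['s', 'e', 'n', 's', 'ö', 'r'] t.toList = true
  · simp [h1, h2, h3, h4, h5, h6, h7, h8, h9, h10, h11, h12, h13, h14, h15, h16]
  by_cases h17 : PySem.Chars.isIn ['m', 'o', 't', 'o', 'r'] t.toList = true
  · simp [h1, h2, h3, h4, h5, h6, h7, h8, h9, h10, h11, h12, h13, h14, h15, h16, h17]
  by_cases h18 : PySem.Chars.isIn ['s', 'e', 'r', 'v', 'o'] t.toList = true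
  · simp [h1, h2, h3, h4, h5, h6, h7, h8, h9, h10, h11, h12, h13, h14, h15, h16, h17, h18]
  by_cases h19 : PySem.Chars.isIn ['s', 't', 'e', 'p'] t.toList = true
  · simp [h1, h2, h3, h4, h5, h6, h7, h8, h9, h10, h11, h12, h13, h14, h15, h16, h17, h18, h19]
  by_cases h20 : PySem.Chars.isIn ['r', 'e', 'g', 'ü', 'l', 'a', 't'] t.toList = true
  · simp [h1, h2, h3, h4, h5, h6, h7, h8, h9, h10, h11, h12, h13, h14, h15, h16, h17, h18, h19, h20]
  by_cases h21 : PySem.Chars.isIn ['r', 'e', 'g', 'u', 'l', 'a', 't', 'o', 'r'] t.toList = true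
  · simp [h1, h2, h3, h4, h5, h6, h7, h8, h9, h10, h11, h12, h13, h14, h15, h16, h17, h18, h19, h20, h21]
  by_cases h22 : PySem.Chars.isIn ['l', 'm'] t.toList = true
  · by_cases h23 : (∃ x ∈ t.toList, PySem.Chars.isdigit x = true)
    · simp [h1, h2, h3, h4, h5, h6, h7, h8, h9, h10, h11, h12, h13, h14, h15, h16, h17, h18, h19, h20, h21, h22, h23]
    · simp [h1, h2, h3, h4, h5, h6, h7, h8, h9, h10, h11, h12, h13, h14, h15, h16, h17, h18, h19, h20, h21, h22, h23]
  · simp [h1, h2, h3, h4, h5, h6, h7, h8, h9, h10, h11, h12, h13, h14, h15, h16, h17, h18, h19, h20, h21, h22]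

-- ===== VERDICT (by name: the statement is the Claim_ definition above) =====
theorem smart_fallback_description_py_spec : Claim_equal_smart_fallback_description_py := by
  intro product _
  unfold Spec_smart_fallback_description_py smart_fallback_description_py smart_fallback_description_py_alt
  simp only [pvHint_eq]
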